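-- pv_equiv track=rewrite | github.com/Kamanoku/AOIS | lab7/main.py | extract_words_diagonal
-- ===== SOURCE A (Python) =====
-- def extract_words_diagonal(matrix):
--     """Извлекает 16 слов из матрицы по диагоналям со смещением"""
--     size = len(matrix)
--     words = []
--     for col in range(size):
--         word = ''
--         for row in range(size):
--             i = (row + col) % size
--             word += str(matrix[i][col])
--         words.append(word)
--     return words
-- ===== SOURCE B (Python) =====
-- def extract_words_diagonal(matrix):
--     """Извлекает 16 слов из матрицы по диагоналям со смещением"""
--     size = len(matrix)
--     parts = [[None] * size for _ in range(size)]
--     for i, row in enumerate(matrix):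
--         for col in range(size):
--             parts[col][(i - col) % size] = str(row[col])
--     return [''.join(p) for p in parts]
-- ===== Notes on version B (the rewrite author's own statement) =====
-- stated objective: alternative
-- what changed: B inverts the traversal: instead of A's column-outer loop reading matrix[(row+col)%size][col] and growing each word by string concatenation, it makes one row-major pass that scatters each digit str(row[col]) into its target slot parts[col][(i-col)%size] of a preallocated size-by-size grid and then joins each slot list.
import Mathlib
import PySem

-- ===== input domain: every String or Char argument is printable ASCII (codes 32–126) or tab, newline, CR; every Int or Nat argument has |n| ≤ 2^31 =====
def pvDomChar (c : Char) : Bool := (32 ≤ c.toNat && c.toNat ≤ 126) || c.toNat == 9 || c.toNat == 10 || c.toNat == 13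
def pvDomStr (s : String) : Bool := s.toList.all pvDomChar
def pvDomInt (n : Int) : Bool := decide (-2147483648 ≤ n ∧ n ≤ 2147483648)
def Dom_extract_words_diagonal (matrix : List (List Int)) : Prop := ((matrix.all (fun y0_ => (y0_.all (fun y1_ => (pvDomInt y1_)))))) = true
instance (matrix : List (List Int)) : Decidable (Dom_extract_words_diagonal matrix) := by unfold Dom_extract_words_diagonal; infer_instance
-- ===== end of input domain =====

-- B replaces A's per-column modular reads by a single row-major scatter pass: it walks the
-- matrix once row by row and writes each digit str(row[col]) into its target slot
-- parts[col][(i-col) % size] of a preallocated size×size grid, then joins each slot list.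

-- ===== PORT A =====
def extract_words_diagonal (matrix : List (List Int)) : List String :=
  let size : Int := (matrix.length : Int)
  (PySem.List.pyRange 0 size 1).foldl (fun words col =>
    let word := (PySem.List.pyRange 0 size 1).foldl (fun w row =>
      let i := PySem.Int.mod (row + col) size
      w ++ PySem.Int.toStr (PySem.List.pyGetD (PySem.List.pyGetD matrix i []) col 0)) ""
    words ++ [word]) []

-- ===== PORT B =====
-- Python's 'None' placeholders are ported as ""; on every admitted input each slot is
-- overwritten exactly once before being read, so the placeholder value is never observed.
def extract_words_diagonal_alt (matrix : List (List Int)) : List String :=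
  let size : Nat := matrix.length
  let parts0 : List (List String) := List.replicate size (List.replicate size "")
  let parts := (PySem.List.enumerate matrix).foldl (fun ps p =>
      (PySem.List.pyRange 0 (size : Int) 1).foldl (fun ps col =>
        ps.set col.toNat ((ps.getD col.toNat []).set
          (PySem.Int.mod (p.1 - col) (size : Int)).toNat
          (PySem.Int.toStr (PySem.List.pyGetD p.2 col 0)))) ps) parts0
  parts.map (fun p => PySem.Str.join "" p)

-- ===== PRECONDITION & SPEC =====
-- Pre_ excludes ragged matrices with a row shorter than len(matrix): there both Pythons raise IndexError.
def Pre_extract_words_diagonal (matrix : List (List Int)) : Prop :=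
  ∀ row ∈ matrix, matrix.length ≤ row.length
instance (matrix : List (List Int)) : Decidable (Pre_extract_words_diagonal matrix) := by
  unfold Pre_extract_words_diagonal; infer_instance
def pvWitness_extract_words_diagonal : List (List Int) := [[1, 2], [30, -4]]

def Spec_extract_words_diagonal (matrix : List (List Int)) (out : List String) : Prop := out = extract_words_diagonal_alt matrix
instance (matrix : List (List Int)) (out : List String) : Decidable (Spec_extract_words_diagonal matrix out) := by unfold Spec_extract_words_diagonal; infer_instance

-- ===== CLAIM (what is proved, stated in full; the proofs are below) =====
def Claim_equal_extract_words_diagonal : Prop := ∀ (matrix : List (List Int)), Dom_extract_words_diagonal matrix → Pre_extract_words_diagonal matrix → Spec_extract_words_diagonal matrix (extract_words_diagonal matrix)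

-- ===== LEMMAS AND PROOFS =====

-- the digit string both programs place at slot k of word c (j = the source row index)
def pvW (matrix : List (List Int)) (j c : Nat) : String :=
  PySem.Int.toStr (PySem.List.pyGetD (matrix.getD j []) (c : Int) 0)

-- the common normal form both ports are reduced to
def pvCommon (matrix : List (List Int)) : List String :=
  (List.range matrix.length).map (fun c =>
    PySem.Str.join "" ((List.range matrix.length).map (fun k =>
      pvW matrix ((k + c) % matrix.length) c)))

-- ''.join over List Char
lemma toList_join_empty (parts : List String) :
    (PySem.Str.join "" parts).toList = (parts.map String.toList).flatten := by
  rw [PySem.Str.toList_join]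
  show List.intercalate [] _ = _
  unfold List.intercalate
  induction parts.map String.toList with
  | nil => rfl
  | cons a t ih =>
    cases t with
    | nil => rfl
    | cons b t2 => simp_all [List.intersperse]

-- the string-accumulating fold is a flatten of the mapped pieces
lemma toList_foldl_append {γ : Type} (l : List γ) (f : γ → String) (init : String) :
    (l.foldl (fun w r => w ++ f r) init).toList
      = init.toList ++ (l.map (fun r => (f r).toList)).flatten := by
  induction l generalizing init with
  | nil => simp
  | cons a t ih => simp [List.foldl_cons, ih]

-- getD after a single in-place write
lemma getD_set {α : Type} (l : List α) (i j : Nat) (a d : α) :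
    (l.set i a).getD j d = if i = j ∧ j < l.length then a else l.getD j d := by
  simp only [List.getD, List.getElem?_set]
  split_ifs with h1 h2 h3 <;> simp_all

-- a pass of in-place writes indexed by range n, described entrywise
lemma foldl_range_set {β : Type} (n : Nat) (G : Nat → β → β) (d : β) (ps : List β)
    (hlen : n ≤ ps.length) :
    ((List.range n).foldl (fun ps c => ps.set c (G c (ps.getD c d))) ps).length = ps.length ∧
    ∀ c, ((List.range n).foldl (fun ps c => ps.set c (G c (ps.getD c d))) ps).getD c d
        = if c < n then G c (ps.getD c d) else ps.getD c d := by
  induction n with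
  | zero => simp
  | succ m ih =>
    obtain ⟨ihl, ihe⟩ := ih (by omega)
    rw [List.range_succ, List.foldl_append, List.foldl_cons, List.foldl_nil]
    refine ⟨by rw [List.length_set, ihl], ?_⟩
    intro c
    simp only [getD_set, ihl, ihe]
    by_cases hc : c = m
    · subst hc
      have h1 : c < ps.length := by omega
      simp [h1]
    · by_cases hlt : c < m
      · simp only [if_neg (by omega : ¬ (m = c ∧ c < ps.length)), if_pos hlt,
          if_pos (by omega : c < m + 1)]
      · simp only [if_neg (by omega : ¬ (m = c ∧ c < ps.length)), if_neg hlt,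
          if_neg (by omega : ¬ c < m + 1)]

-- Python's (i - c) % n as a Nat, for 0 ≤ i, c < n
lemma mod_sub_toNat (i c n : Nat) (hi : i < n) (hc : c < n) :
    (PySem.Int.mod ((i : Int) - (c : Int)) (n : Int)).toNat = (i + n - c) % n := by
  have h1 : (i : Int) - (c : Int) = ((i + n - c : Nat) : Int) - (n : Int) := by omega
  rw [h1, PySem.Int.mod_eq_emod_of_pos (by omega), Int.sub_emod_right]
  rw [show ((i + n - c : Nat) : Int) % (n : Int) = (((i + n - c) % n : Nat) : Int) from
    (Int.natCast_mod _ _).symm]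
  exact Int.toNat_natCast _

-- Python's (k + c) % n on Nat casts
lemma mod_add_cast (k c n : Nat) :
    PySem.Int.mod ((k : Int) + (c : Int)) (n : Int) = (((k + c) % n : Nat) : Int) := by
  rw [show ((k : Int) + (c : Int)) = ((k + c : Nat) : Int) by push_cast; ring]
  exact PySem.Int.mod_natCast _ _
-- rotating left by c and right by c are inverse permutations of range n
lemma rot_left_right (s k c n : Nat) (hs : s < n) (hk : k < n) (hc : c < n) :
    (s + n - c) % n = k ↔ (k + c) % n = s := by
  constructor
  · rintro rfl
    rw [Nat.mod_add_mod, show s + n - c + c = s + n by omega, Nat.add_mod_right,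
      Nat.mod_eq_of_lt hs]
  · rintro rfl
    by_cases h : k + c < n
    · rw [Nat.mod_eq_of_lt h, show k + c + n - c = k + n by omega, Nat.add_mod_right,
        Nat.mod_eq_of_lt hk]
    · have hm : (k + c) % n = k + c - n := by
        rw [Nat.mod_eq_sub_mod (by omega)]; exact Nat.mod_eq_of_lt (by omega)
      rw [hm, show k + c - n + n - c = k by omega, Nat.mod_eq_of_lt hk]

-- B's inner column loop over one row: every entry c < n gets one write
lemma step_one (n : Nat) (i : Int) (row : List Int) (ps : List (List String))
    (hlen : ps.length = n) :
    ((PySem.List.pyRange 0 (n : Int) 1).foldl (fun ps col =>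
        ps.set col.toNat ((ps.getD col.toNat []).set
          (PySem.Int.mod (i - col) (n : Int)).toNat
          (PySem.Int.toStr (PySem.List.pyGetD row col 0)))) ps).length = n ∧
    ∀ c, ((PySem.List.pyRange 0 (n : Int) 1).foldl (fun ps col =>
        ps.set col.toNat ((ps.getD col.toNat []).set
          (PySem.Int.mod (i - col) (n : Int)).toNat
          (PySem.Int.toStr (PySem.List.pyGetD row col 0)))) ps).getD c []
      = if c < n then
          (ps.getD c []).set (PySem.Int.mod (i - (c : Int)) (n : Int)).toNat
            (PySem.Int.toStr (PySem.List.pyGetD row (c : Int) 0))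
        else ps.getD c [] := by
  have hr : (PySem.List.pyRange 0 (n : Int) 1).foldl (fun ps col =>
        ps.set col.toNat ((ps.getD col.toNat []).set
          (PySem.Int.mod (i - col) (n : Int)).toNat
          (PySem.Int.toStr (PySem.List.pyGetD row col 0)))) ps
      = (List.range n).foldl (fun ps c =>
          ps.set c ((fun c e => e.set (PySem.Int.mod (i - (c : Nat)) (n : Int)).toNat
            (PySem.Int.toStr (PySem.List.pyGetD row ((c : Nat) : Int) 0))) c (ps.getD c []))) ps := by
    rw [PySem.List.pyRange_zero_natCast, List.foldl_map]
    simp only [Int.toNat_natCast]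
  rw [hr]
  obtain ⟨h1, h2⟩ := foldl_range_set n
    (fun c e => e.set (PySem.Int.mod (i - (c : Nat)) (n : Int)).toNat
      (PySem.Int.toStr (PySem.List.pyGetD row ((c : Nat) : Int) 0))) [] ps (by omega)
  exact ⟨by rw [h1, hlen], h2⟩

-- the scatter pass, characterised entrywise: after processing rows s..s+len-1,
-- slot k of word c holds the digit of source row (k+c) % n iff that row was processed
lemma scatter (matrix : List (List Int)) (rows : List (List Int)) (s : Nat)
    (ps : List (List String))
    (hlen : ps.length = matrix.length)
    (hin : ∀ c, c < matrix.length → (ps.getD c []).length = matrix.length)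
    (hs : s + rows.length ≤ matrix.length)
    (hrows : ∀ t, t < rows.length → rows.getD t [] = matrix.getD (s + t) []) :
    ((PySem.List.enumerate rows (s : Int)).foldl (fun ps p =>
      (PySem.List.pyRange 0 ((matrix.length : Nat) : Int) 1).foldl (fun ps col =>
        ps.set col.toNat ((ps.getD col.toNat []).set
          (PySem.Int.mod (p.1 - col) ((matrix.length : Nat) : Int)).toNat
          (PySem.Int.toStr (PySem.List.pyGetD p.2 col 0)))) ps) ps).length = matrix.length ∧
    (∀ c, c < matrix.length →
      (((PySem.List.enumerate rows (s : Int)).foldl (fun ps p =>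
        (PySem.List.pyRange 0 ((matrix.length : Nat) : Int) 1).foldl (fun ps col =>
          ps.set col.toNat ((ps.getD col.toNat []).set
            (PySem.Int.mod (p.1 - col) ((matrix.length : Nat) : Int)).toNat
            (PySem.Int.toStr (PySem.List.pyGetD p.2 col 0)))) ps) ps).getD c []).length
        = matrix.length) ∧
    (∀ c k, c < matrix.length → k < matrix.length →
      (((PySem.List.enumerate rows (s : Int)).foldl (fun ps p =>
        (PySem.List.pyRange 0 ((matrix.length : Nat) : Int) 1).foldl (fun ps col =>
          ps.set col.toNat ((ps.getD col.toNat []).set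
            (PySem.Int.mod (p.1 - col) ((matrix.length : Nat) : Int)).toNat
            (PySem.Int.toStr (PySem.List.pyGetD p.2 col 0)))) ps) ps).getD c []).getD k ""
        = if s ≤ (k + c) % matrix.length ∧ (k + c) % matrix.length < s + rows.length
          then pvW matrix ((k + c) % matrix.length) c
          else (ps.getD c []).getD k "") := by
  induction rows generalizing s ps with
  | nil =>
    simp only [PySem.List.enumerate_nil, List.foldl_nil]
    refine ⟨hlen, hin, ?_⟩
    intro c k hc hk
    rw [if_neg (by simp only [List.length_nil]; omega)]
  | cons row rest ih =>
    set n := matrix.length with hn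
    rw [PySem.List.enumerate_cons, List.foldl_cons]
    obtain ⟨hl1, he1⟩ := step_one n (s : Int) row ps hlen
    have hsn : s < n := by have := hs; simp at this; omega
    have hin1 : ∀ c, c < n → ((((PySem.List.pyRange 0 (n : Int) 1).foldl (fun ps col =>
        ps.set col.toNat ((ps.getD col.toNat []).set
          (PySem.Int.mod ((s : Int) - col) (n : Int)).toNat
          (PySem.Int.toStr (PySem.List.pyGetD row col 0)))) ps)).getD c []).length = n := by
      intro c hc
      rw [he1 c, if_pos hc, List.length_set]
      exact hin c hc
    have hcast : ((s : Int) + 1) = (((s + 1 : Nat)) : Int) := by push_cast; ring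
    rw [hcast]
    obtain ⟨rl, rin, re⟩ := ih (s + 1) _ hl1 hin1 (by simp at hs ⊢; omega)
      (by intro t ht
          have := hrows (t + 1) (by simp; omega)
          simpa [Nat.add_assoc, Nat.add_comm 1 t] using this)
    refine ⟨rl, rin, ?_⟩
    intro c k hc hk
    rw [re c k hc hk, he1 c, if_pos hc, getD_set, hin c hc]
    rw [mod_sub_toNat s c n hsn hc]
    by_cases hj : (k + c) % n = s
    · have hidx : (s + n - c) % n = k := (rot_left_right s k c n hsn hk hc).mpr hj
      rw [if_neg (by omega), if_pos ⟨hidx, hk⟩, if_pos (by simp; omega)]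
      have hrow : row = matrix.getD s [] := by
        have := hrows 0 (by simp)
        simpa using this
      rw [hj, pvW, hrow]
    · have hidx : ¬ ((s + n - c) % n = k ∧ k < n) := by
        intro ⟨h1, _⟩
        exact hj ((rot_left_right s k c n hsn hk hc).mp h1)
      rw [if_neg hidx]
      by_cases hge : s + 1 ≤ (k + c) % n ∧ (k + c) % n < s + 1 + rest.length
      · rw [if_pos hge, if_pos (by simp; omega)]
      · rw [if_neg hge, if_neg (by simp at hge ⊢; omega)]

-- A = pvCommon
lemma a_eq_common (matrix : List (List Int)) :
    extract_words_diagonal matrix = pvCommon matrix := by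
  unfold extract_words_diagonal pvCommon
  simp only []
  rw [PySem.List.foldl_append_singleton_eq_map, List.nil_append]
  rw [PySem.List.pyRange_zero_natCast, List.map_map]
  apply List.map_congr_left
  intro c hc
  simp only [Function.comp_def]
  apply String.toList_inj.mp
  rw [List.foldl_map, toList_foldl_append, toList_join_empty]
  rw [List.map_map]
  simp only [Function.comp_def, String.toList_empty, List.nil_append]
  apply congrArg
  apply List.map_congr_left
  intro k _
  unfold pvW
  rw [mod_add_cast]
  simp only [PySem.List.pyGetD_natCast]

-- pointwise extensionality via getD
lemma ext_getD {α : Type} (l l' : List α) (d : α) (hl : l.length = l'.length)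
    (h : ∀ i, i < l.length → l.getD i d = l'.getD i d) : l = l' := by
  apply List.ext_getElem hl
  intro i h1 h2
  have := h i h1
  rwa [List.getD_eq_getElem _ _ h1, List.getD_eq_getElem _ _ h2] at this

-- the finished scatter grid is the rotated-column grid
lemma parts_eq (matrix : List (List Int)) :
    ((PySem.List.enumerate matrix ((0 : Nat) : Int)).foldl (fun ps p =>
      (PySem.List.pyRange 0 ((matrix.length : Nat) : Int) 1).foldl (fun ps col =>
        ps.set col.toNat ((ps.getD col.toNat []).set
          (PySem.Int.mod (p.1 - col) ((matrix.length : Nat) : Int)).toNat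
          (PySem.Int.toStr (PySem.List.pyGetD p.2 col 0)))) ps)
      (List.replicate matrix.length (List.replicate matrix.length "")))
    = (List.range matrix.length).map (fun c =>
        (List.range matrix.length).map (fun k =>
          pvW matrix ((k + c) % matrix.length) c)) := by
  have hrep : ∀ c, c < matrix.length →
      (List.replicate matrix.length (List.replicate matrix.length "")).getD c []
        = List.replicate matrix.length "" := by
    intro c hc
    simp [List.getD, hc]
  obtain ⟨rl, rin, re⟩ := scatter matrix matrix 0
    (List.replicate matrix.length (List.replicate matrix.length ""))
    (by simp) (by intro c hc; rw [hrep c hc]; simp) (by omega)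
    (by intro t ht; simp)
  apply ext_getD _ _ []
  · rw [rl]; simp
  · intro c hc1
    have hc : c < matrix.length := by rwa [rl] at hc1
    rw [List.getD_eq_getElem ((List.range matrix.length).map (fun c =>
        (List.range matrix.length).map (fun k => pvW matrix ((k + c) % matrix.length) c))) _
      (by simpa using hc), List.getElem_map, List.getElem_range]
    apply ext_getD _ _ ""
    · rw [rin c hc]; simp
    · intro k hk1
      have hk : k < matrix.length := by rwa [rin c hc] at hk1
      rw [re c k hc hk, if_pos ⟨Nat.zero_le _, by have := Nat.mod_lt (k + c) (by omega : 0 < matrix.length); omega⟩]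
      rw [List.getD_eq_getElem _ _ (by simpa using hk), List.getElem_map, List.getElem_range]

-- B = pvCommon
lemma b_eq_common (matrix : List (List Int)) :
    extract_words_diagonal_alt matrix = pvCommon matrix := by
  unfold extract_words_diagonal_alt pvCommon
  simp only []
  rw [show (PySem.List.enumerate matrix) = PySem.List.enumerate matrix ((0 : Nat) : Int) by
    norm_num]
  rw [parts_eq, List.map_map]
  simp only [Function.comp_def]

-- ===== VERDICT (by name: the statement is the Claim_ definition above) =====
theorem extract_words_diagonal_spec : Claim_equal_extract_words_diagonal := by
  intro matrix _ _
  unfold Spec_extract_words_diagonal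
  rw [a_eq_common, b_eq_common]
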